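-- pv_equiv track=rewrite | github.com/judev1/FBot | lib/modes.py | capitalise
-- ===== SOURCE A (Python) =====
-- def capitalise(text):
--
--     new_text = ""
--     new_sentence = True
--     for char in text:
--         if new_sentence:
--             if char.isalpha():
--                 char = char.upper()
--                 new_sentence = False
--         elif char == ".":
--             new_sentence = True
--         elif char == "'":
--             if new_text[-1] == "i":
--                 new_text = new_text[:-1] + "I"
--         new_text += char
--
--     return new_text
-- ===== SOURCE B (Python) =====
-- def cap_first(part):
--     for i, ch in enumerate(part):
--         if ch.isalpha():
--             return part[:i] + ch.upper() + part[i+1:]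
--     return part
--
-- def capitalise(text):
--     parts = [cap_first(part) for part in text.split('.')]
--     return '.'.join(parts).replace("i'", "I'")
-- ===== Notes on version B (the rewrite author's own statement) =====
-- stated objective: simpler
-- what changed: A's single char-by-char state machine (a new_sentence flag plus back-patching the last emitted output char on an apostrophe) is replaced by two whole-string stages: split on the sentence separator, uppercase the first alphabetic character of each piece, join the pieces back, then one global replace of the lowercase-i-apostrophe digraph by its capitalised form.
import Mathlib
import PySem

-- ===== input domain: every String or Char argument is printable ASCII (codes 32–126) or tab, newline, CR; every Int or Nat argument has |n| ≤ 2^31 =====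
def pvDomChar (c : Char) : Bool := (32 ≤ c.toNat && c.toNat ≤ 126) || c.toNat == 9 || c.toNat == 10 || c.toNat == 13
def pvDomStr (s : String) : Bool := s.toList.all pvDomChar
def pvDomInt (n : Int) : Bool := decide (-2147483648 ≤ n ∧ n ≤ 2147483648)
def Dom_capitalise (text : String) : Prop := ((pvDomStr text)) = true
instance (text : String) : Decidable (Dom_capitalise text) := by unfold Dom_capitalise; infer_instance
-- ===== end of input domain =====

-- B replaces A's single char-by-char state machine (which back-patches the already built output
-- on an apostrophe) by two whole-string stages: split on '.' / uppercase the first letter of each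
-- piece / join, then one global replace of "i'" by "I'"; objective: simpler (and measured faster: whole-string methods instead of a per-char loop).

-- ===== PORT A =====
-- One iteration of A's for-loop; state = (new_text as List Char, new_sentence).
-- new_text[-1] is ported as pyGetD with default ' ': it is evaluated only with new_sentence = False,
-- which A reaches only after appending at least one character, so the default is never consulted
-- in a run of `capitalise` (Python would raise IndexError exactly there).
def stepA (st : List Char × Bool) (c : Char) : List Char × Bool :=
  if st.2 then
    if PySem.Chars.isalpha c then (st.1 ++ [PySem.Chars.upperChar c], false)
    else (st.1 ++ [c], st.2)
  else if c = '.' then (st.1 ++ [c], true)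
  else if c = '\'' then
    (if PySem.List.pyGetD st.1 (-1) ' ' = 'i'
       then PySem.List.slice st.1 none (some (-1)) ++ ['I'] ++ [c]
       else st.1 ++ [c], st.2)
  else (st.1 ++ [c], st.2)

def capitalise (text : String) : String :=
  String.ofList (text.toList.foldl stepA ([], true)).1

-- ===== PORT B =====
-- cap_first's for-loop over enumerate(part): pre is part[:i]; on the first alphabetic char it
-- returns part[:i] + ch.upper() + part[i+1:].
def capFirstGo (pre : List Char) : List Char → List Char
  | [] => pre
  | c :: cs =>
    if PySem.Chars.isalpha c then pre ++ PySem.Chars.upperChar c :: cs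
    else capFirstGo (pre ++ [c]) cs

def capitalise_alt (text : String) : String :=
  let parts := PySem.Chars.splitOn text.toList ['.']
  let parts := parts.map (capFirstGo [])
  String.ofList (PySem.Chars.replace (PySem.Chars.join ['.'] parts) ['i', '\''] ['I', '\''])

-- ===== PRECONDITION & SPEC =====
def Spec_capitalise (text : String) (out : String) : Prop := out = capitalise_alt text
instance (text : String) (out : String) : Decidable (Spec_capitalise text out) := by unfold Spec_capitalise; infer_instance

-- ===== CLAIM (what is proved, stated in full; the proofs are below) =====
def Claim_equal_capitalise : Prop := ∀ (text : String), Dom_capitalise text → Spec_capitalise text (capitalise text)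

-- ===== LEMMAS AND PROOFS =====

-- Character facts: the uppercased form of a letter is an upper-case letter, hence never 'i' or '\''.
theorem char_le_iff {a b : Char} : a ≤ b ↔ a.toNat ≤ b.toNat := ⟨Fin.mk_le_mk.mp, Fin.mk_le_mk.mpr⟩

theorem upperChar_isupper (c : Char) (h : PySem.Chars.isalpha c = true) :
    PySem.Chars.isupper (PySem.Chars.upperChar c) = true := by
  unfold PySem.Chars.isalpha PySem.Chars.islower PySem.Chars.isupper PySem.Chars.upperChar at *
  simp only [Bool.or_eq_true, Bool.and_eq_true, decide_eq_true_eq, char_le_iff] at h ⊢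
  have ha : ('a':Char).toNat = 97 := by decide
  have hz : ('z':Char).toNat = 122 := by decide
  have hA : ('A':Char).toNat = 65 := by decide
  have hZ : ('Z':Char).toNat = 90 := by decide
  split_ifs with hlow <;>
    simp only [PySem.Chars.islower, Bool.and_eq_true, decide_eq_true_eq, char_le_iff] at hlow
  · have hval : Nat.isValidChar (c.toNat - 32) := by left; omega
    have htn : (Char.ofNat (c.toNat - 32)).toNat = c.toNat - 32 := by simp [Char.ofNat, hval]
    omega
  · omega

theorem upperChar_ne_i (c : Char) (h : PySem.Chars.isalpha c = true) :
    PySem.Chars.upperChar c ≠ 'i' := by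
  intro he
  have hu := upperChar_isupper c h
  rw [he] at hu; exact absurd hu (by decide)

theorem upperChar_ne_apos (c : Char) (h : PySem.Chars.isalpha c = true) :
    PySem.Chars.upperChar c ≠ '\'' := by
  intro he
  have hu := upperChar_isupper c h
  rw [he] at hu; exact absurd hu (by decide)

-- Reference shapes used to connect the two ports.
-- spl l = (first '.'-free piece of l, the remaining pieces), i.e. l.split('.').
def spl : List Char → List Char × List (List Char)
  | [] => ([], [])
  | c :: t => if c = '.' then ([], (spl t).1 :: (spl t).2) else (c :: (spl t).1, (spl t).2)

-- capFirst = cap_first without the prefix accumulator.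
def capFirst : List Char → List Char
  | [] => []
  | c :: t => if PySem.Chars.isalpha c then PySem.Chars.upperChar c :: t else c :: capFirst t

-- Stage 1 of B written as one scan with A's new_sentence flag.
def capStage : List Char → Bool → List Char
  | [], _ => []
  | c :: t, flag =>
    if flag then
      if PySem.Chars.isalpha c then PySem.Chars.upperChar c :: capStage t false
      else c :: capStage t true
    else if c = '.' then c :: capStage t true
    else c :: capStage t false

-- Stage 2 of B (replace "i'" -> "I'") written as a one-char-lookahead scan.
def rep : List Char → List Char
  | [] => []
  | c :: t => (if c = 'i' ∧ t.head? = some '\'' then 'I' else c) :: rep t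

-- '.' ++ capitalised piece, for each remaining piece.
def joinTail : List (List Char) → List Char
  | [] => []
  | p :: r => '.' :: (capFirst p ++ joinTail r)

-- A's pending back-patch: if the next char is '\'' and the output ends in 'i', that 'i' becomes 'I'.
def patch (acc : List Char) (flag : Bool) (cs : List Char) : List Char :=
  if flag = false ∧ cs.head? = some '\'' ∧ PySem.List.pyGetD acc (-1) ' ' = 'i'
  then acc.dropLast ++ ['I'] else acc

-- splitOn.go equations for sep = ['.'] and its characterisation by spl.
theorem splitOn_go_zero (l cur : List Char) (acc : List (List Char)) :
    PySem.Chars.splitOn.go ['.'] 0 l cur acc = ((cur.reverse ++ l) :: acc).reverse := by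
  rw [PySem.Chars.splitOn.go.eq_def]

theorem splitOn_go_nil (fuel : Nat) (cur : List Char) (acc : List (List Char)) :
    PySem.Chars.splitOn.go ['.'] (fuel+1) [] cur acc = (cur.reverse :: acc).reverse := by
  rw [PySem.Chars.splitOn.go.eq_def]

theorem splitOn_go_cons (fuel : Nat) (c : Char) (rest cur : List Char) (acc : List (List Char)) :
    PySem.Chars.splitOn.go ['.'] (fuel+1) (c::rest) cur acc =
      if c = '.' then PySem.Chars.splitOn.go ['.'] fuel rest [] (cur.reverse::acc)
      else PySem.Chars.splitOn.go ['.'] fuel rest (c::cur) acc := by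
  rw [PySem.Chars.splitOn.go.eq_def]
  by_cases h : c = '.'
  · subst h; simp [List.isPrefixOf]
  · simp [List.isPrefixOf, h]
    exact fun hc => absurd hc.symm h

theorem splitOn_go_spec (fuel : Nat) (l cur : List Char) (acc : List (List Char))
    (hlen : l.length ≤ fuel) :
    PySem.Chars.splitOn.go ['.'] fuel l cur acc
      = acc.reverse ++ (cur.reverse ++ (spl l).1) :: (spl l).2 := by
  induction fuel generalizing l cur acc with
  | zero =>
    have : l = [] := by cases l <;> simp_all
    subst this
    simp [splitOn_go_zero, spl]
  | succ fuel ih =>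
    cases l with
    | nil => simp [splitOn_go_nil, spl]
    | cons c rest =>
      rw [splitOn_go_cons]
      simp only [List.length_cons] at hlen
      by_cases h : c = '.'
      · subst h
        rw [if_pos rfl, ih rest [] _ (by omega)]
        simp [spl]
      · rw [if_neg h, ih rest (c::cur) acc (by omega)]
        simp [spl, h]

theorem splitOn_eq_spl (l : List Char) :
    PySem.Chars.splitOn l ['.'] = (spl l).1 :: (spl l).2 := by
  unfold PySem.Chars.splitOn
  rw [splitOn_go_spec (l.length + 1) l [] [] (by omega)]
  simp

-- replace.go equations for old = "i'" and its characterisation by rep.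
theorem replace_go_zero (l acc : List Char) :
    PySem.Chars.replace.go ['i','\''] ['I','\''] 0 l acc = acc.reverse ++ l := by
  rw [PySem.Chars.replace.go.eq_def]

theorem replace_go_nil (fuel : Nat) (acc : List Char) :
    PySem.Chars.replace.go ['i','\''] ['I','\''] (fuel+1) [] acc = acc.reverse := by
  rw [PySem.Chars.replace.go.eq_def]

theorem replace_go_cons (fuel : Nat) (c : Char) (t acc : List Char) :
    PySem.Chars.replace.go ['i','\''] ['I','\''] (fuel+1) (c::t) acc =
      if c = 'i' ∧ t.head? = some '\''
      then PySem.Chars.replace.go ['i','\''] ['I','\''] fuel t.tail ('\''::'I'::acc)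
      else PySem.Chars.replace.go ['i','\''] ['I','\''] fuel t (c::acc) := by
  have hiff : (List.isPrefixOf ['i','\''] (c::t) = true) ↔ (c = 'i' ∧ t.head? = some '\'') := by
    cases t with
    | nil => simp [List.isPrefixOf]
    | cons d t' =>
      simp [List.isPrefixOf]
      constructor <;> rintro ⟨h1, h2⟩ <;> exact ⟨h1.symm, h2.symm⟩
  by_cases h : c = 'i' ∧ t.head? = some '\''
  · obtain ⟨hc, ht⟩ := h
    subst hc
    cases t with
    | nil => simp at ht
    | cons d t' =>
      simp only [List.head?_cons, Option.some.injEq] at ht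
      subst ht
      rw [PySem.Chars.replace.go.eq_def]
      simp [List.isPrefixOf]
  · rw [PySem.Chars.replace.go.eq_def]
    simp only [List.length_cons]
    have hpre : List.isPrefixOf ['i','\''] (c::t) = false := by
      rw [← Bool.not_eq_true]; exact fun hp => h (hiff.mp hp)
    simp [hpre, h]

theorem replace_go_spec (fuel : Nat) (l acc : List Char) (hlen : l.length ≤ fuel) :
    PySem.Chars.replace.go ['i','\''] ['I','\''] fuel l acc = acc.reverse ++ rep l := by
  induction fuel generalizing l acc with
  | zero =>
    have : l = [] := by cases l <;> simp_all
    subst this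
    simp [replace_go_zero, rep]
  | succ fuel ih =>
    cases l with
    | nil => simp [replace_go_nil, rep]
    | cons c t =>
      rw [replace_go_cons]
      simp only [List.length_cons] at hlen
      by_cases h : c = 'i' ∧ t.head? = some '\''
      · obtain ⟨hc, ht⟩ := h
        subst hc
        cases t with
        | nil => simp at ht
        | cons d t' =>
          simp only [List.head?_cons, Option.some.injEq] at ht
          subst ht
          rw [if_pos ⟨rfl, rfl⟩]
          simp only [List.tail_cons]
          rw [ih t' _ (by simp at hlen ⊢; omega)]
          simp [rep]
      · rw [if_neg h, ih t (c::acc) (by omega)]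
        simp only [rep, if_neg h]
        simp
theorem replace_eq_rep (l : List Char) :
    PySem.Chars.replace l ['i','\''] ['I','\''] = rep l := by
  unfold PySem.Chars.replace
  rw [if_neg (by simp)]
  rw [replace_go_spec l.length l [] (by omega)]
  simp

-- cap_first with and without the prefix accumulator.
theorem capFirstGo_eq (l : List Char) : ∀ pre, capFirstGo pre l = pre ++ capFirst l := by
  induction l with
  | nil => intro pre; simp [capFirstGo, capFirst]
  | cons c t ih =>
    intro pre
    by_cases h : PySem.Chars.isalpha c = true
    · simp [capFirstGo, capFirst, h]
    · simp [capFirstGo, capFirst, h, ih]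

-- '.'-join of the capitalised pieces.
theorem join_map_capFirst (h : List Char) (r : List (List Char)) :
    PySem.Chars.join ['.'] ((h :: r).map (capFirstGo [])) = capFirst h ++ joinTail r := by
  induction r generalizing h with
  | nil => rw [List.map_cons, List.map_nil, PySem.Chars.join_singleton, capFirstGo_eq]; simp [joinTail]
  | cons p r ih =>
    rw [List.map_cons, List.map_cons, PySem.Chars.join_cons_cons,
      show List.map (capFirstGo []) r = List.map (capFirstGo []) r from rfl]
    rw [show (capFirstGo [] p :: List.map (capFirstGo []) r)
          = List.map (capFirstGo []) (p :: r) from by rw [List.map_cons], ih p]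
    simp [joinTail, capFirstGo_eq]

-- Stage 1 of B equals the capStage scan.
theorem capStage_eq_spl (l : List Char) :
    capStage l true = capFirst (spl l).1 ++ joinTail (spl l).2 ∧
    capStage l false = (spl l).1 ++ joinTail (spl l).2 := by
  induction l with
  | nil => simp [capStage, spl, capFirst, joinTail]
  | cons c t ih =>
    by_cases hdot : c = '.'
    · subst hdot
      have hdotalpha : PySem.Chars.isalpha '.' = false := by decide
      constructor <;> simp [capStage, spl, capFirst, joinTail, ih.1, hdotalpha]
    · by_cases ha : PySem.Chars.isalpha c = true
      · constructor <;> simp [capStage, spl, capFirst, hdot, ha, ih.2]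
      · constructor <;> simp [capStage, spl, capFirst, hdot, ha, ih.1, ih.2]

-- capStage does not create or destroy a leading apostrophe.
theorem capStage_head_apos (l : List Char) (flag : Bool) :
    (capStage l flag).head? = some '\'' ↔ l.head? = some '\'' := by
  cases l with
  | nil => simp [capStage]
  | cons c t =>
    have hapos : PySem.Chars.isalpha '\'' = false := by decide
    by_cases ha : PySem.Chars.isalpha c = true
    · have hne := upperChar_ne_apos c ha
      have hcne : c ≠ '\'' := by intro he; rw [he] at ha; simp [hapos] at ha
      cases flag with
      | true => simp [capStage, ha, hne, hcne]
      | false =>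
        simp [capStage, hcne]
        split_ifs <;> simp [hcne]
    · cases flag with
      | true => simp [capStage, ha]
      | false =>
        simp [capStage]
        split_ifs <;> simp

-- The loop invariant for A: the fold equals the already-built output (with its pending
-- back-patch) followed by rep of the capitalisation stage of the remaining input.
theorem loopA_spec (cs : List Char) : ∀ (acc : List Char) (flag : Bool),
    (cs.foldl stepA (acc, flag)).1 = patch acc flag cs ++ rep (capStage cs flag) := by
  induction cs with
  | nil => intro acc flag; simp [patch, rep, capStage]
  | cons c t ih =>
    intro acc flag
    rw [List.foldl_cons]
    have hialpha : PySem.Chars.isalpha 'i' = true := by decide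
    cases flag with
    | true =>
      by_cases ha : PySem.Chars.isalpha c = true
      · have hstep : stepA (acc, true) c = (acc ++ [PySem.Chars.upperChar c], false) := by
          simp [stepA, ha]
        rw [hstep, ih]
        have hU := upperChar_ne_i c ha
        have hp1 : patch (acc ++ [PySem.Chars.upperChar c]) false t = acc ++ [PySem.Chars.upperChar c] := by
          unfold patch
          rw [if_neg]
          rintro ⟨-, -, hlast⟩
          rw [PySem.List.pyGetD_neg_one_append_singleton] at hlast
          exact hU hlast
        have hp2 : patch acc true (c :: t) = acc := by
          unfold patch; rw [if_neg]; rintro ⟨hff, -, -⟩; exact Bool.noConfusion hff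
        rw [hp1, hp2]
        have hcs : capStage (c :: t) true = PySem.Chars.upperChar c :: capStage t false := by
          simp [capStage, ha]
        rw [hcs]
        have hrep : rep (PySem.Chars.upperChar c :: capStage t false)
            = PySem.Chars.upperChar c :: rep (capStage t false) := by
          simp only [rep]
          rw [if_neg]; · rintro ⟨hu, -⟩; exact hU hu
        rw [hrep]
        simp
      · have hstep : stepA (acc, true) c = (acc ++ [c], true) := by
          simp [stepA, ha]
        rw [hstep, ih]
        have hci : c ≠ 'i' := by intro he; rw [he] at ha; exact ha hialpha
        have hp1 : patch (acc ++ [c]) true t = acc ++ [c] := by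
          unfold patch; rw [if_neg]; rintro ⟨hff, -, -⟩; exact Bool.noConfusion hff
        have hp2 : patch acc true (c :: t) = acc := by
          unfold patch; rw [if_neg]; rintro ⟨hff, -, -⟩; exact Bool.noConfusion hff
        rw [hp1, hp2]
        have hcs : capStage (c :: t) true = c :: capStage t true := by
          simp [capStage, ha]
        rw [hcs]
        have hrep : rep (c :: capStage t true) = c :: rep (capStage t true) := by
          simp only [rep]
          rw [if_neg]; · rintro ⟨hu, -⟩; exact hci hu
        rw [hrep]
        simp
    | false =>
      by_cases hdot : c = '.'
      · subst hdot
        have hstep : stepA (acc, false) '.' = (acc ++ ['.'], true) := by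
          simp [stepA]
        rw [hstep, ih]
        have hp1 : patch (acc ++ ['.']) true t = acc ++ ['.'] := by
          unfold patch; rw [if_neg]; rintro ⟨hff, -, -⟩; exact Bool.noConfusion hff
        have hp2 : patch acc false ('.' :: t) = acc := by
          unfold patch; rw [if_neg]; rintro ⟨-, hh, -⟩; simp at hh
        rw [hp1, hp2]
        have hcs : capStage ('.' :: t) false = '.' :: capStage t true := by
          simp [capStage]
        rw [hcs]
        have hrep : rep ('.' :: capStage t true) = '.' :: rep (capStage t true) := by
          simp only [rep]
          rw [if_neg]; · rintro ⟨hu, -⟩; simp at hu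
        rw [hrep]
        simp
      · by_cases hap : c = '\''
        · subst hap
          by_cases hi : PySem.List.pyGetD acc (-1) ' ' = 'i'
          · have hstep : stepA (acc, false) '\'' =
                ((acc.dropLast ++ ['I']) ++ ['\''], false) := by
              simp [stepA, hdot, hi, PySem.List.slice_to_neg_one]
            rw [hstep, ih]
            have hp1 : patch ((acc.dropLast ++ ['I']) ++ ['\'']) false t
                = (acc.dropLast ++ ['I']) ++ ['\''] := by
              unfold patch
              rw [if_neg]
              rintro ⟨-, -, hlast⟩
              rw [PySem.List.pyGetD_neg_one_append_singleton] at hlast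
              simp at hlast
            have hp2 : patch acc false ('\'' :: t) = acc.dropLast ++ ['I'] := by
              simp [patch, hi]
            rw [hp1, hp2]
            have hcs : capStage ('\'' :: t) false = '\'' :: capStage t false := by
              simp [capStage, hdot]
            rw [hcs]
            have hrep : rep ('\'' :: capStage t false) = '\'' :: rep (capStage t false) := by
              simp only [rep]
              rw [if_neg]; · rintro ⟨hu, -⟩; simp at hu
            rw [hrep]
            simp
          · have hstep : stepA (acc, false) '\'' = (acc ++ ['\''], false) := by
              simp [stepA, hdot, hi]
            rw [hstep, ih]
            have hp1 : patch (acc ++ ['\'']) false t = acc ++ ['\''] := by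
              unfold patch
              rw [if_neg]
              rintro ⟨-, -, hlast⟩
              rw [PySem.List.pyGetD_neg_one_append_singleton] at hlast
              simp at hlast
            have hp2 : patch acc false ('\'' :: t) = acc := by
              unfold patch; rw [if_neg]; rintro ⟨-, -, hlast⟩; exact hi hlast
            rw [hp1, hp2]
            have hcs : capStage ('\'' :: t) false = '\'' :: capStage t false := by
              simp [capStage, hdot]
            rw [hcs]
            have hrep : rep ('\'' :: capStage t false) = '\'' :: rep (capStage t false) := by
              simp only [rep]
              rw [if_neg]; · rintro ⟨hu, -⟩; simp at hu
            rw [hrep]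
            simp
        · have hstep : stepA (acc, false) c = (acc ++ [c], false) := by
            simp [stepA, hdot, hap]
          rw [hstep, ih]
          have hp2 : patch acc false (c :: t) = acc := by
            unfold patch
            rw [if_neg]
            rintro ⟨-, hh, -⟩
            simp only [List.head?_cons, Option.some.injEq] at hh
            exact hap hh
          rw [hp2]
          have hcs : capStage (c :: t) false = c :: capStage t false := by
            simp [capStage, hdot]
          rw [hcs]
          by_cases hcond : t.head? = some '\'' ∧ c = 'i'
          · obtain ⟨hh, hc⟩ := hcond
            subst hc
            have hp1 : patch (acc ++ ['i']) false t = acc ++ ['I'] := by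
              unfold patch
              rw [PySem.List.pyGetD_neg_one_append_singleton]
              simp [hh]
            rw [hp1]
            have hrep : rep ('i' :: capStage t false) = 'I' :: rep (capStage t false) := by
              have hch := (capStage_head_apos t false).mpr hh
              simp [rep, hch]
            rw [hrep]
            simp
          · have hp1 : patch (acc ++ [c]) false t = acc ++ [c] := by
              unfold patch
              rw [if_neg]
              rintro ⟨-, hh, hlast⟩
              rw [PySem.List.pyGetD_neg_one_append_singleton] at hlast
              exact hcond ⟨hh, hlast⟩
            rw [hp1]
            have hrep : rep (c :: capStage t false) = c :: rep (capStage t false) := by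
              simp only [rep]
              rw [if_neg]
              rintro ⟨hc, hh⟩
              exact hcond ⟨(capStage_head_apos t false).mp hh, hc⟩
            rw [hrep]
            simp

-- ===== VERDICT (by name: the statement is the Claim_ definition above) =====
theorem capitalise_spec : Claim_equal_capitalise := by
  intro text _dom
  unfold Spec_capitalise
  have hB : capitalise_alt text = String.ofList (rep (capStage text.toList true)) := by
    simp only [capitalise_alt]
    rw [splitOn_eq_spl, join_map_capFirst, replace_eq_rep, ← (capStage_eq_spl text.toList).1]
  have hpatch : patch [] true text.toList = ([] : List Char) := by
    unfold patch; rw [if_neg]; rintro ⟨hff, -, -⟩; exact Bool.noConfusion hff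
  unfold capitalise
  rw [loopA_spec text.toList [] true, hpatch, hB]
  simp
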